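-- pv_equiv track=rewrite | github.com/Ascendral/KlomboAGI | klomboagi/reasoning/arc_dsl_v2.py | tile_3x3
-- ===== SOURCE A (Python) =====
-- Grid = list[list[int]]
--
-- def tile_3x3(grid: Grid) -> Grid:
--     rows, cols = len(grid), len(grid[0])
--     result = []
--     for r in range(rows * 3):
--         row = []
--         for c in range(cols * 3):
--             row.append(grid[r % rows][c % cols])
--         result.append(row)
--     return result
-- ===== SOURCE B (Python) =====
-- def tile_3x3(grid):
--     rows, cols = len(grid), len(grid[0])
--     horiz = [[row[c % cols] for c in range(cols * 3)] for row in grid]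
--     return [list(horiz[r % rows]) for r in range(rows * 3)]
-- ===== Notes on version B (the rewrite author's own statement) =====
-- stated objective: faster
-- what changed: Replaces the single nested modulo loop by a two-phase decomposition: a horizontal pass builds each triple-width row once, then a vertical pass replicates copies of those rows, so per-cell indexing/modulo work is done once per source row instead of three times.
import Mathlib
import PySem

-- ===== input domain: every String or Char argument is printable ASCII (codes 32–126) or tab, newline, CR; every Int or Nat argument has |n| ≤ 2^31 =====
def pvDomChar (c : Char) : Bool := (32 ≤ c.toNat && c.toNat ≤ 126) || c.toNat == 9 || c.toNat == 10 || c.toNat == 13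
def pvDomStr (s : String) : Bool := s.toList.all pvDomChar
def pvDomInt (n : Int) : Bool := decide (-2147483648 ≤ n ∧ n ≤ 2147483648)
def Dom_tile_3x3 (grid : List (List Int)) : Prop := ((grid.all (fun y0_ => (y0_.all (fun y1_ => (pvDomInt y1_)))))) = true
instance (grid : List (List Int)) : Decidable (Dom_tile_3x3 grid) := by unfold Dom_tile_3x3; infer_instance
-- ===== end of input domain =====

-- B tiles the grid in two phases (horizontal triple-width rows, then vertical replication) instead of A's single nested modulo loop; alternative decomposition, return value only.

-- ===== PORT A =====
def tile_3x3 (grid : List (List Int)) : List (List Int) :=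
  let rows : Int := grid.length
  let cols : Int := ((PySem.List.pyGet? grid 0).getD []).length
  (PySem.List.pyRange 0 (rows * 3) 1).foldl (fun result r =>
    result ++ [ (PySem.List.pyRange 0 (cols * 3) 1).foldl (fun row c =>
      row ++ [ (PySem.List.pyGet?
                  ((PySem.List.pyGet? grid (PySem.Int.mod r rows)).getD [])
                  (PySem.Int.mod c cols)).getD 0 ]) [] ]) []

-- ===== PORT B =====
def tile_3x3_alt (grid : List (List Int)) : List (List Int) :=
  let rows : Int := grid.length
  let cols : Int := ((PySem.List.pyGet? grid 0).getD []).length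
  let horiz : List (List Int) := grid.map (fun row =>
    (PySem.List.pyRange 0 (cols * 3) 1).map (fun c =>
      (PySem.List.pyGet? row (PySem.Int.mod c cols)).getD 0))
  (PySem.List.pyRange 0 (rows * 3) 1).map (fun r =>
    (PySem.List.pyGet? horiz (PySem.Int.mod r rows)).getD [])

-- ===== PRECONDITION & SPEC =====
-- Pre_ excludes exactly the inputs where Python A raises IndexError: the empty grid
-- (grid[0]) and ragged grids with a row shorter than the first row (row[c % cols]).
def Pre_tile_3x3 (grid : List (List Int)) : Prop :=
  grid ≠ [] ∧ ∀ row ∈ grid, (grid.headD []).length ≤ row.length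
instance (grid : List (List Int)) : Decidable (Pre_tile_3x3 grid) := by
  unfold Pre_tile_3x3; infer_instance
def pvWitness_tile_3x3 : List (List Int) := [[1, 2], [3, 4]]

def Spec_tile_3x3 (grid : List (List Int)) (out : List (List Int)) : Prop := out = tile_3x3_alt grid
instance (grid : List (List Int)) (out : List (List Int)) : Decidable (Spec_tile_3x3 grid out) := by unfold Spec_tile_3x3; infer_instance

-- ===== CLAIM (what is proved, stated in full; the proofs are below) =====
def Claim_equal_tile_3x3 : Prop := ∀ (grid : List (List Int)), Dom_tile_3x3 grid → Pre_tile_3x3 grid → Spec_tile_3x3 grid (tile_3x3 grid)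

-- ===== LEMMAS AND PROOFS =====

-- indexing through a map commutes with pyGet? for nonnegative indices
theorem pyGet?_map_of_nonneg {α β : Type} (f : α → β) (l : List α) (i : Int) (h : 0 ≤ i) :
    PySem.List.pyGet? (l.map f) i = (PySem.List.pyGet? l i).map f := by
  rw [PySem.List.pyGet?_of_nonneg _ h, PySem.List.pyGet?_of_nonneg _ h,
    List.getElem?_map]

theorem tile_3x3_spec : Claim_equal_tile_3x3 := by
  intro grid _ _
  unfold Spec_tile_3x3 tile_3x3 tile_3x3_alt
  simp only [PySem.List.foldl_append_singleton_eq_map]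
  apply List.map_congr_left
  intro r hr
  have hrb := PySem.List.mem_pyRange_one.1 hr
  -- rows > 0 since the outer range is nonempty
  have hrows : (0 : Int) < (grid.length : Int) := by omega
  have h0 : 0 ≤ PySem.Int.mod r (grid.length : Int) := PySem.Int.mod_nonneg _ hrows
  have hlt : PySem.Int.mod r (grid.length : Int) < (grid.length : Int) :=
    PySem.Int.mod_lt _ hrows
  rw [pyGet?_map_of_nonneg _ _ _ h0]
  rw [PySem.List.pyGet?_eq_some_getElem _ h0 (by exact_mod_cast hlt)]
  simp
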